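-- pv_equiv track=rewrite | github.com/manistal/vimcryption | encryptionengine/engine.py | block_iter
-- ===== SOURCE A (Python) =====
-- import functools
--
-- def block_iter(generator, block_size, pad):
--     # type: (Iterable, int, Union[str, bytes])
--     """ Generative iterator that yields a [byte] string of length `block_size`
--         by concatenating characters yielded by `generator.  The final block
--         is padded using `pad`.
--     """
--     block = []
--     for item in generator:
--         block.append(item)
--         if len(block) == block_size:
--             yield functools.reduce(lambda a, b: a + b, block)
--             block = []
--     if block:
--         while len(block) < block_size:
--             block.append(pad)
--         yield functools.reduce(lambda a, b: a + b, block)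
-- ===== SOURCE B (Python) =====
-- import functools
-- import itertools
--
-- def block_iter(generator, block_size, pad):
--     """Pull whole blocks at once with islice instead of appending item-by-item."""
--     it = iter(generator)
--     while True:
--         block = list(itertools.islice(it, block_size))
--         if not block:
--             break
--         if len(block) < block_size:
--             block.extend([pad] * (block_size - len(block)))
--         yield functools.reduce(lambda a, b: a + b, block)
-- ===== Notes on version B (the rewrite author's own statement) =====
-- stated objective: alternative
-- what changed: B slices whole blocks from the iterator with itertools.islice and pads the last block by extend, instead of A's item-by-item append with a length test each iteration and a pad-while loop.
-- outside the precondition, e.g. on block_iter(['a'], 0, 'x'): A returns ['a'], B returns []; on block_iter(['a'], -1, 'x'): A returns ['a'], B raises ValueError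
import Mathlib
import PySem

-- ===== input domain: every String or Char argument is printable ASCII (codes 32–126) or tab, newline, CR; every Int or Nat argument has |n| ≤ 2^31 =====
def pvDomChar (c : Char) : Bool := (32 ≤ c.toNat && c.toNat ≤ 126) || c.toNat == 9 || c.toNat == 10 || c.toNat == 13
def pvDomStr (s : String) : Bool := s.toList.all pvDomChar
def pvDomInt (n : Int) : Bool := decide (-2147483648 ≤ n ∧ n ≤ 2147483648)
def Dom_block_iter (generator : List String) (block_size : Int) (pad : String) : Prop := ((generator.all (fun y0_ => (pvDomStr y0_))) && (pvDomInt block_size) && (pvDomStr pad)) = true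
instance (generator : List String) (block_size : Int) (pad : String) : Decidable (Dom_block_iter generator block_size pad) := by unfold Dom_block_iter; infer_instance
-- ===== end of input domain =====

-- B pulls whole fixed-size blocks at once (take/drop chunking, the port of islice) instead of A's
-- item-by-item accumulator with a length test each step; equivalent for block_size ≥ 1 (alternative).


-- Python's 'a + b' on str, kernel-transparent (Lean's String.append is opaque to the kernel)
def strAdd (a b : String) : String := PySem.Str.join "" [a, b]

-- functools.reduce(lambda a, b: a + b, block): both Pythons call it only on a non-empty block
def pyReduceAdd : List String → String
  | [] => ""
  | h :: t => t.foldl strAdd h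

-- ===== PORT A =====
-- the trailing 'while len(block) < block_size: block.append(pad)' loop
def padWhile (block_size : Int) (pad : String) (block : List String) : List String :=
  if (block.length : Int) < block_size then padWhile block_size pad (block ++ [pad]) else block
termination_by block_size.toNat - block.length
decreasing_by simp; omega

def block_iter (generator : List String) (block_size : Int) (pad : String) : List String :=
  let st := generator.foldl (fun (st : List String × List String) item =>
    let block := st.2 ++ [item]
    if (block.length : Int) = block_size then (st.1 ++ [pyReduceAdd block], [])
    else (st.1, block)) ([], [])
  if st.2 ≠ [] then st.1 ++ [pyReduceAdd (padWhile block_size pad st.2)] else st.1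

-- ===== PORT B =====
-- 'while True: block = list(islice(it, block_size))' — chunk by take/drop; m encodes block_size = m+1
def bChunks (m : Nat) (pad : String) : List String → List String
  | [] => []
  | x :: xs =>
    let block := (x :: xs).take (m + 1)
    let padded := block ++ List.replicate (m + 1 - block.length) pad
    pyReduceAdd padded :: bChunks m pad (xs.drop m)
termination_by l => l.length
decreasing_by simp

def block_iter_alt (generator : List String) (block_size : Int) (pad : String) : List String :=
  if block_size ≤ 0 then [] else bChunks (block_size.toNat - 1) pad generator

-- ===== PRECONDITION & SPEC =====
-- Pre_ excludes non-positive block_size, a degenerate size on which A's length test never fires and it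
-- yields one unpadded catch-all block, while B's islice yields nothing (0) or raises ValueError (negative).
def Pre_block_iter (generator : List String) (block_size : Int) (pad : String) : Prop := 1 ≤ block_size
instance (generator : List String) (block_size : Int) (pad : String) : Decidable (Pre_block_iter generator block_size pad) := by unfold Pre_block_iter; infer_instance

def pvWitness_block_iter : List String × Int × String := (["ab", "c", "d"], 2, "*")

def Spec_block_iter (generator : List String) (block_size : Int) (pad : String) (out : List String) : Prop := out = block_iter_alt generator block_size pad
instance (generator : List String) (block_size : Int) (pad : String) (out : List String) : Decidable (Spec_block_iter generator block_size pad out) := by unfold Spec_block_iter; infer_instance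

-- ===== CLAIM (what is proved, stated in full; the proofs are below) =====
def Claim_equal_block_iter : Prop := ∀ (generator : List String) (block_size : Int) (pad : String), Dom_block_iter generator block_size pad → Pre_block_iter generator block_size pad → Spec_block_iter generator block_size pad (block_iter generator block_size pad)

-- ===== LEMMAS AND PROOFS =====

-- A's pad-while loop appends exactly the missing copies of pad
lemma padWhile_eq (block_size : Int) (pad : String) (block : List String) :
    padWhile block_size pad block = block ++ List.replicate (block_size.toNat - block.length) pad := by
  fun_induction padWhile block_size pad block with
  | case1 b h ih =>
    rw [ih]
    have : block_size.toNat - b.length = (block_size.toNat - (b.length + 1)) + 1 := by omega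
    simp [this, List.replicate_succ]
  | case2 b h =>
    have : block_size.toNat - b.length = 0 := by omega
    simp [this]

lemma bChunks_ne_nil (m : Nat) (pad : String) (l : List String) (h : l ≠ []) :
    bChunks m pad l = pyReduceAdd (l.take (m+1) ++ List.replicate (m + 1 - (l.take (m+1)).length) pad)
      :: bChunks m pad (l.drop (m+1)) := by
  cases l with
  | nil => exact absurd rfl h
  | cons x xs => simp [bChunks]

lemma fold_eq_chunks (m : Nat) (pad : String) :
    ∀ (gen out b : List String), b.length < m + 1 →
    (let st := gen.foldl (fun (st : List String × List String) item =>
        let block := st.2 ++ [item]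
        if (block.length : Int) = ((m : Int) + 1) then (st.1 ++ [pyReduceAdd block], [])
        else (st.1, block)) (out, b)
     if st.2 ≠ [] then st.1 ++ [pyReduceAdd (padWhile ((m : Int) + 1) pad st.2)] else st.1)
    = out ++ bChunks m pad (b ++ gen) := by
  intro gen
  induction gen with
  | nil =>
    intro out b hb
    simp only [List.foldl_nil, List.append_nil]
    by_cases hbe : b = []
    · simp [hbe, bChunks]
    · rw [bChunks_ne_nil m pad b hbe]
      have ht : b.take (m+1) = b := List.take_of_length_le (by omega)
      have hd : b.drop (m+1) = [] := List.drop_eq_nil_of_le (by omega)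
      rw [ht, hd]
      simp [hbe, padWhile_eq, bChunks]
  | cons g gs ih =>
    intro out b hb
    simp only [List.foldl_cons]
    by_cases he : (((b ++ [g]).length : Int)) = ((m : Int) + 1)
    · have hlen : (b ++ [g]).length = m + 1 := by simp at he ⊢; omega
      simp only [if_pos he]
      have hih := ih (out ++ [pyReduceAdd (b ++ [g])]) [] (by simp)
      simp only [List.nil_append] at hih
      rw [hih]
      rw [show b ++ g :: gs = (b ++ [g]) ++ gs by simp]
      rw [bChunks_ne_nil m pad ((b ++ [g]) ++ gs) (by simp)]
      rw [show m + 1 = (b ++ [g]).length from hlen.symm, List.take_left, List.drop_left]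
      simp [hlen]
    · simp only [if_neg he]
      have hih := ih out (b ++ [g]) (by simp at he ⊢; omega)
      rw [hih]
      simp

-- ===== VERDICT (by name: the statement is the Claim_ definition above) =====
theorem block_iter_spec : Claim_equal_block_iter := by
  intro generator block_size pad _ hpre
  unfold Pre_block_iter at hpre
  obtain ⟨m, hm⟩ : ∃ m : Nat, block_size = (m : Int) + 1 := ⟨block_size.toNat - 1, by omega⟩
  subst hm
  unfold Spec_block_iter block_iter_alt
  rw [if_neg (show ¬((m : Int) + 1 ≤ 0) by omega), show ((m : Int) + 1).toNat - 1 = m by omega]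
  unfold block_iter
  exact fold_eq_chunks m pad generator [] [] (by simp)
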